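-- pv_equiv track=rewrite | github.com/nicolao00/BOJ-study | 프로그래머스/2/87390. n＾2 배열 자르기/n＾2 배열 자르기.py | solution
-- ===== SOURCE A (Python) =====
-- def solution(n, left, right):
--     answer = []
--
--     while left <= right:
--         r = left // n + 1
--         c = left % n + 1
--
--         answer.append(max(r, c))
--         left += 1
--
--     return answer
-- ===== SOURCE B (Python) =====
-- def solution(n, left, right):
--     answer = []
--     if left > right:
--         return answer
--     start_row, start_col = divmod(left, n)
--     end_row, end_col = divmod(right, n)
--     for r in range(start_row, end_row + 1):
--         c_begin = start_col if r == start_row else 0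
--         c_end = end_col if r == end_row else n - 1
--         for c in range(c_begin, c_end + 1):
--             answer.append(max(r + 1, c + 1))
--     return answer
-- ===== Notes on version B (the rewrite author's own statement) =====
-- stated objective: alternative
-- what changed: Replaces A's single flat-index while-loop (one divmod per element) with a nested row/column-segment traversal: compute the start and end row once, then per row emit max(r+1,c+1) over that row's column span.
-- outside the precondition, e.g. on solution(-2, 0, 2): A returns [1, 0, 1], B returns []; on solution(0, 0, 2): A raises ZeroDivisionError, B raises ZeroDivisionError
import Mathlib
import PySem

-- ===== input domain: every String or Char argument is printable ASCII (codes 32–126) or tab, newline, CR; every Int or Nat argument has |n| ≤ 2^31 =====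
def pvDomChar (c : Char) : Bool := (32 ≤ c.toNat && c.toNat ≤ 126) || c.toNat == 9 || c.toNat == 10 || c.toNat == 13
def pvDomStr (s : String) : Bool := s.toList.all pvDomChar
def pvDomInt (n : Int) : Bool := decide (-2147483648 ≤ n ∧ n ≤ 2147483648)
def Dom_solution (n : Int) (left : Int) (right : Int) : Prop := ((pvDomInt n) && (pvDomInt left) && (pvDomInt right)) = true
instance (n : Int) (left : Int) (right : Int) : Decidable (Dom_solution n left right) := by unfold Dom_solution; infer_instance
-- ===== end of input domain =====

-- B replaces A's flat-index while-loop by a row/column-segment traversal (same output, similar cost).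


-- ===== PORT A =====
def solutionGo (n : Int) (right : Int) (left : Int) (answer : List Int) : List Int :=
  if left ≤ right then
    solutionGo n right (left + 1)
      (answer ++ [max (PySem.Int.floordiv left n + 1) (PySem.Int.mod left n + 1)])
  else answer
termination_by (right + 1 - left).toNat
decreasing_by omega

def solution (n : Int) (left : Int) (right : Int) : List Int :=
  solutionGo n right left []

-- ===== PORT B =====
def solution_alt (n : Int) (left : Int) (right : Int) : List Int :=
  let answer : List Int := []
  if left > right then answer
  else
    let sr := PySem.Int.floordiv left n
    let sc := PySem.Int.mod left n
    let er := PySem.Int.floordiv right n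
    let ec := PySem.Int.mod right n
    (PySem.List.pyRange sr (er + 1) 1).foldl (fun acc r =>
      let cb := if r = sr then sc else 0
      let ce := if r = er then ec else n - 1
      (PySem.List.pyRange cb (ce + 1) 1).foldl (fun acc2 c => acc2 ++ [max (r + 1) (c + 1)]) acc)
      answer

-- ===== PRECONDITION & SPEC =====
-- Pre_ excludes only n ≤ 0 with a non-empty index range left ≤ right: there A raises
-- ZeroDivisionError (n = 0) or, for negative n, returns floor-division artefacts that
-- B's row decomposition does not reproduce.
def Pre_solution (n : Int) (left : Int) (right : Int) : Prop := 1 ≤ n ∨ right < left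
instance (n : Int) (left : Int) (right : Int) : Decidable (Pre_solution n left right) := by unfold Pre_solution; infer_instance
def pvWitness_solution : Int × Int × Int := (3, 2, 5)

def Spec_solution (n : Int) (left : Int) (right : Int) (out : List Int) : Prop := out = solution_alt n left right
instance (n : Int) (left : Int) (right : Int) (out : List Int) : Decidable (Spec_solution n left right out) := by unfold Spec_solution; infer_instance

-- ===== CLAIM (what is proved, stated in full; the proofs are below) =====
def Claim_equal_solution : Prop := ∀ (n : Int) (left : Int) (right : Int), Dom_solution n left right → Pre_solution n left right → Spec_solution n left right (solution n left right)

-- ===== LEMMAS AND PROOFS =====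

/-- the per-cell value of A -/
def cellVal (n x : Int) : Int := max (PySem.Int.floordiv x n + 1) (PySem.Int.mod x n + 1)

theorem solutionGo_eq (n r l : Int) (acc : List Int) :
    solutionGo n r l acc = acc ++ (PySem.List.pyRange l (r + 1) 1).map (cellVal n) := by
  rw [solutionGo]
  by_cases h : l ≤ r
  · rw [if_pos h, solutionGo_eq n r (l + 1),
      PySem.List.pyRange_one_cons (by omega : l < r + 1)]
    simp [cellVal]
  · rw [if_neg h, PySem.List.pyRange_one_eq_nil (by omega)]
    simp
termination_by (r + 1 - l).toNat
decreasing_by omega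

theorem cellVal_row (n q c : Int) (hn : 1 ≤ n) (hc0 : 0 ≤ c) (hcn : c < n) :
    cellVal n (q * n + c) = max (q + 1) (c + 1) := by
  have hfd : PySem.Int.floordiv (q * n + c) n = q := by
    rw [PySem.Int.floordiv_eq_ediv_of_pos (by omega)]
    rw [show q * n + c = c + q * n by ring, Int.add_mul_ediv_right _ _ (by omega : n ≠ 0),
      Int.ediv_eq_zero_of_lt hc0 hcn]
    ring
  have hmd : PySem.Int.mod (q * n + c) n = c := by
    rw [PySem.Int.mod_eq_emod_of_pos (by omega)]
    rw [show q * n + c = c + n * q by ring, Int.add_mul_emod_self_left,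
      Int.emod_eq_of_lt hc0 hcn]
  rw [cellVal, hfd, hmd]

/-- one row segment: columns c .. c+m-1 of row q are the flat cells q*n+c .. -/
theorem seg_eq (n q : Int) (hn : 1 ≤ n) (m : Nat) :
    ∀ c : Int, 0 ≤ c → c + m ≤ n →
    (PySem.List.pyRange c (c + m) 1).map (fun cc => max (q + 1) (cc + 1))
      = (PySem.List.pyRange (q * n + c) (q * n + c + m) 1).map (cellVal n) := by
  induction m with
  | zero =>
    intro c _ _
    rw [PySem.List.pyRange_one_eq_nil (by omega), PySem.List.pyRange_one_eq_nil (by omega)]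
    rfl
  | succ m ih =>
    intro c hc0 hcn
    have hcast : ((m + 1 : Nat) : Int) = (m : Int) + 1 := by push_cast; ring
    rw [hcast] at hcn ⊢
    rw [PySem.List.pyRange_one_cons (by omega : c < c + ((m : Int) + 1)),
      PySem.List.pyRange_one_cons (by omega : q * n + c < q * n + c + ((m : Int) + 1)),
      List.map_cons, List.map_cons, cellVal_row n q c hn hc0 (by omega)]
    congr 1
    have hih := ih (c + 1) (by omega) (by omega)
    rw [show (c + 1) + (m : Int) = c + ((m : Int) + 1) by ring] at hih
    rw [show q * n + (c + 1) = q * n + c + 1 by ring] at hih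
    rw [show q * n + c + 1 + (m : Int) = q * n + c + ((m : Int) + 1) by ring] at hih
    exact hih

theorem flatMap_congr' {α β : Type} (l : List α) (f g : α → List β)
    (h : ∀ x ∈ l, f x = g x) : l.flatMap f = l.flatMap g := by
  induction l with
  | nil => rfl
  | cons a t ih =>
    simp only [List.flatMap_cons]
    rw [h a (by simp), ih (fun x hx => h x (by simp [hx]))]

/-- the row/column traversal, written as flatMap, flattens to the flat-index map -/
theorem rows_eq (n : Int) (hn : 1 ≤ n) (k : Nat) :
    ∀ l r : Int, l ≤ r →
      PySem.Int.floordiv r n = PySem.Int.floordiv l n + k →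
    (PySem.List.pyRange (PySem.Int.floordiv l n) (PySem.Int.floordiv r n + 1) 1).flatMap
      (fun rr =>
        (PySem.List.pyRange (if rr = PySem.Int.floordiv l n then PySem.Int.mod l n else 0)
            ((if rr = PySem.Int.floordiv r n then PySem.Int.mod r n else n - 1) + 1) 1).map
          (fun c => max (rr + 1) (c + 1)))
      = (PySem.List.pyRange l (r + 1) 1).map (cellVal n) := by
  induction k with
  | zero =>
    intro l r hlr hk
    simp only [Nat.cast_zero, add_zero] at hk
    rw [hk]
    have hl := PySem.Int.floordiv_mul_add_mod l n
    have hr := PySem.Int.floordiv_mul_add_mod r n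
    rw [hk] at hr
    obtain ⟨P, hP⟩ : ∃ x, x = PySem.Int.floordiv l n * n := ⟨_, rfl⟩
    rw [← hP] at hl hr
    have hm0 : 0 ≤ PySem.Int.mod l n := by
      rw [PySem.Int.mod_eq_emod_of_pos (by omega)]; exact Int.emod_nonneg _ (by omega)
    have hmr : PySem.Int.mod r n < n := by
      rw [PySem.Int.mod_eq_emod_of_pos (by omega)]; exact Int.emod_lt_of_pos _ (by omega)
    have hml : PySem.Int.mod l n < n := by
      rw [PySem.Int.mod_eq_emod_of_pos (by omega)]; exact Int.emod_lt_of_pos _ (by omega)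
    rw [PySem.List.pyRange_one_cons
        (by omega : PySem.Int.floordiv l n < PySem.Int.floordiv l n + 1),
      PySem.List.pyRange_one_eq_nil (le_refl _), List.flatMap_cons, List.flatMap_nil,
      List.append_nil, if_pos rfl, if_pos rfl]
    have hseg := seg_eq n (PySem.Int.floordiv l n) hn
      (PySem.Int.mod r n + 1 - PySem.Int.mod l n).toNat (PySem.Int.mod l n) hm0 (by omega)
    have e1 : PySem.Int.mod l n
        + ((PySem.Int.mod r n + 1 - PySem.Int.mod l n).toNat : Int) = PySem.Int.mod r n + 1 := by
      omega
    rw [e1] at hseg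
    rw [← hP] at hseg
    rw [hseg, hl]
    have e2 : l + ((PySem.Int.mod r n + 1 - PySem.Int.mod l n).toNat : Int) = r + 1 := by omega
    rw [e2]
  | succ k ih =>
    intro l r hlr hk
    obtain ⟨sr, hsr⟩ : ∃ x, x = PySem.Int.floordiv l n := ⟨_, rfl⟩
    obtain ⟨er, her⟩ : ∃ x, x = PySem.Int.floordiv r n := ⟨_, rfl⟩
    rw [← hsr, ← her] at hk ⊢
    obtain ⟨P, hP⟩ : ∃ x, x = sr * n := ⟨_, rfl⟩
    obtain ⟨Q, hQ⟩ : ∃ x, x = er * n := ⟨_, rfl⟩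
    have hl : P + PySem.Int.mod l n = l := by
      rw [hP, hsr]; exact PySem.Int.floordiv_mul_add_mod l n
    have hrr : Q + PySem.Int.mod r n = r := by
      rw [hQ, her]; exact PySem.Int.floordiv_mul_add_mod r n
    have hm0 : 0 ≤ PySem.Int.mod l n := by
      rw [PySem.Int.mod_eq_emod_of_pos (by omega)]; exact Int.emod_nonneg _ (by omega)
    have hml : PySem.Int.mod l n < n := by
      rw [PySem.Int.mod_eq_emod_of_pos (by omega)]; exact Int.emod_lt_of_pos _ (by omega)
    have hmr0 : 0 ≤ PySem.Int.mod r n := by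
      rw [PySem.Int.mod_eq_emod_of_pos (by omega)]; exact Int.emod_nonneg _ (by omega)
    have hsrer : sr < er := by push_cast at hk; omega
    obtain ⟨l', hl'⟩ : ∃ x, x = (sr + 1) * n := ⟨_, rfl⟩
    have hfl' : PySem.Int.floordiv l' n = sr + 1 := by
      rw [hl', PySem.Int.floordiv_eq_ediv_of_pos (by omega), Int.mul_ediv_cancel _ (by omega)]
    have hml' : PySem.Int.mod l' n = 0 := by
      rw [hl', PySem.Int.mod_eq_emod_of_pos (by omega), Int.mul_emod_left]
    have hl'n : l' = P + n := by rw [hl', hP]; ring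
    have hern : P + n ≤ Q := by
      rw [hP, hQ, show sr * n + n = (sr + 1) * n by ring]
      exact mul_le_mul_of_nonneg_right (by omega) (by omega)
    have hl'r : l' ≤ r := by omega
    rw [PySem.List.pyRange_one_cons (show sr < er + 1 by omega), List.flatMap_cons,
      if_pos rfl, if_neg (show ¬ sr = er by omega)]
    have hIH := ih l' r hl'r (by rw [hfl', ← her]; push_cast at hk ⊢; omega)
    rw [hfl', ← her, hml'] at hIH
    simp only [ite_self] at hIH
    have hrest :
        (PySem.List.pyRange (sr + 1) (er + 1) 1).flatMap
          (fun rr =>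
            (PySem.List.pyRange (if rr = sr then PySem.Int.mod l n else 0)
                ((if rr = er then PySem.Int.mod r n else n - 1) + 1) 1).map
              (fun c => max (rr + 1) (c + 1)))
          = (PySem.List.pyRange l' (r + 1) 1).map (cellVal n) := by
      rw [← hIH]
      apply flatMap_congr'
      intro x hx
      rw [PySem.List.mem_pyRange_one] at hx
      rw [if_neg (show ¬ x = sr by omega)]
    rw [hrest]
    have hseg := seg_eq n sr hn (n - PySem.Int.mod l n).toNat (PySem.Int.mod l n) hm0 (by omega)
    have e1 : PySem.Int.mod l n + ((n - PySem.Int.mod l n).toNat : Int) = n - 1 + 1 := by omega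
    rw [e1] at hseg
    rw [← hP] at hseg
    rw [hseg, hl]
    have e2 : l + ((n - PySem.Int.mod l n).toNat : Int) = l' := by omega
    rw [e2, ← List.map_append,
      ← PySem.List.pyRange_one_append l l' (r + 1) (by omega) (by omega)]

-- ===== VERDICT (by name: the statement is the Claim_ definition above) =====
theorem solution_spec : Claim_equal_solution := by
  intro n l r _ hpre
  show solution n l r = solution_alt n l r
  simp only [solution, solution_alt]
  rw [solutionGo_eq]
  by_cases hlr : l > r
  · rw [if_pos hlr, PySem.List.pyRange_one_eq_nil (by omega)]
    simp
  · have hn : (1 : Int) ≤ n := by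
      cases hpre with
      | inl h => exact h
      | inr h => omega
    rw [if_neg hlr]
    have hle : PySem.Int.floordiv l n ≤ PySem.Int.floordiv r n := by
      rw [PySem.Int.floordiv_eq_ediv_of_pos (by omega : 0 < n),
        PySem.Int.floordiv_eq_ediv_of_pos (by omega : 0 < n)]
      exact Int.ediv_le_ediv (by omega) (by omega)
    have hk : PySem.Int.floordiv r n = PySem.Int.floordiv l n
        + ((PySem.Int.floordiv r n - PySem.Int.floordiv l n).toNat : Int) := by omega
    have hmain := rows_eq n hn (PySem.Int.floordiv r n - PySem.Int.floordiv l n).toNat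
      l r (by omega) hk
    simp only [PySem.List.foldl_append_singleton_eq_map]
    rw [PySem.List.foldl_append_eq_flatMap]
    simp only [List.nil_append]
    rw [hmain]
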